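-- pv_equiv track=rewrite | github.com/TylerJ1ger/data-enhance | backend/app/shared/utils/url_utils.py | check_domain_match
-- ===== SOURCE A (Python) =====
-- from typing import Optional, Set, Dict, Any, List
--
-- def check_domain_match(source_domain: str, domain_cache: Set[str]) -> bool:
--     if not source_domain or not domain_cache:
--         return False
--
--     # 直接匹配
--     if source_domain in domain_cache:
--         return True
--
--     # 子域名匹配
--     for domain in domain_cache:
--         if source_domain.endswith('.' + domain):
--             return True
--
--     return False
-- ===== SOURCE B (Python) =====
-- def check_domain_match(source_domain: str, domain_cache) -> bool:
--     if not source_domain or not domain_cache: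
--         return False
--     if source_domain in domain_cache:
--         return True
--     # enumerate the suffixes that start right after a dot and look them up
--     for i, c in enumerate(source_domain):
--         if c == '.' and source_domain[i + 1:] in domain_cache:
--             return True
--     return False
-- ===== Notes on version B (the rewrite author's own statement) =====
-- stated objective: alternative
-- what changed: Instead of scanning the whole cache and testing endswith('.'+domain) for each entry, B enumerates the suffixes of source_domain that start after each dot and looks each one up in the cache set; cost moves from cache size to string length.
import Mathlib
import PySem

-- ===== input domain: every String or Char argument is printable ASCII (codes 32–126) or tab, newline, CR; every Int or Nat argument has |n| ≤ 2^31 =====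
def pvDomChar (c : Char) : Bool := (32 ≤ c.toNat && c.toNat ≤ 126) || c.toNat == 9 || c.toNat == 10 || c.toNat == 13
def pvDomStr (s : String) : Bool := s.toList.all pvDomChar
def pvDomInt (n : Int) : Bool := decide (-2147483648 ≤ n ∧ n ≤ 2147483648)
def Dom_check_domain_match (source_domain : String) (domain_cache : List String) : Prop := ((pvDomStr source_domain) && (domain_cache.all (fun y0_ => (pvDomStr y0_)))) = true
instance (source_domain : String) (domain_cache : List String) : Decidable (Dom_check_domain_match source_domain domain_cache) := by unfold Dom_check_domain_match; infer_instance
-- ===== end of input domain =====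

-- B replaces the scan over the whole cache (endswith '.'+domain for each entry) by enumerating
-- the suffixes of source_domain that start after each dot and looking each up in the cache set.


-- ===== PORT A =====
def check_domain_match (source_domain : String) (domain_cache : List String) : Bool :=
  if source_domain.isEmpty || domain_cache.isEmpty then false
  else if domain_cache.contains source_domain then true
  else domain_cache.any (fun domain => PySem.Str.endswith source_domain ("." ++ domain))

-- ===== PORT B =====
-- the `for i, c in enumerate(source_domain)` loop of Source B: at position of char c, the rest of
-- the list IS source_domain[i+1:]
def cdmAltGo (domain_cache : List String) : List Char → Bool
  | [] => false
  | c :: rest =>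
    (c == '.' && domain_cache.contains (String.ofList rest)) || cdmAltGo domain_cache rest

def check_domain_match_alt (source_domain : String) (domain_cache : List String) : Bool :=
  if source_domain.isEmpty || domain_cache.isEmpty then false
  else if domain_cache.contains source_domain then true
  else cdmAltGo domain_cache source_domain.toList

-- ===== PRECONDITION & SPEC =====
def Spec_check_domain_match (source_domain : String) (domain_cache : List String) (out : Bool) : Prop := out = check_domain_match_alt source_domain domain_cache
instance (source_domain : String) (domain_cache : List String) (out : Bool) : Decidable (Spec_check_domain_match source_domain domain_cache out) := by unfold Spec_check_domain_match; infer_instance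

-- ===== CLAIM (what is proved, stated in full; the proofs are below) =====
def Claim_equal_check_domain_match : Prop := ∀ (source_domain : String) (domain_cache : List String), Dom_check_domain_match source_domain domain_cache → Spec_check_domain_match source_domain domain_cache (check_domain_match source_domain domain_cache)

-- ===== LEMMAS AND PROOFS =====

-- B's scan finds a cached entry iff some cached domain, prefixed with '.', is a suffix of the string
theorem cdmAltGo_iff (domain_cache : List String) (cs : List Char) :
    cdmAltGo domain_cache cs = true ↔ ∃ d ∈ domain_cache, ('.' :: d.toList) <:+ cs := by
  induction cs with
  | nil =>
    simp only [cdmAltGo, Bool.false_eq_true, false_iff]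
    rintro ⟨d, _, h⟩
    exact absurd (List.eq_nil_of_suffix_nil h) (by simp)
  | cons c rest ih =>
    simp only [cdmAltGo, Bool.or_eq_true, Bool.and_eq_true, beq_iff_eq, ih,
      List.contains_eq_mem, decide_eq_true_eq]
    constructor
    · rintro (⟨rfl, hmem⟩ | ⟨d, hd, hsuf⟩)
      · exact ⟨String.ofList rest, hmem, by simp [String.toList_ofList]⟩
      · exact ⟨d, hd, hsuf.trans (List.suffix_cons c rest)⟩
    · rintro ⟨d, hd, hsuf⟩
      rcases List.suffix_cons_iff.mp hsuf with heq | hsuf'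
      · injection heq with h1 h2
        refine Or.inl ⟨h1.symm, ?_⟩
        have hdeq : String.ofList rest = d := h2 ▸ String.ofList_toList
        exact hdeq ▸ hd
      · exact Or.inr ⟨d, hd, hsuf'⟩

theorem check_domain_match_spec : Claim_equal_check_domain_match := by
  intro s cache _
  unfold Spec_check_domain_match check_domain_match check_domain_match_alt
  split
  · rfl
  · split
    · rfl
    · rw [Bool.eq_iff_iff, List.any_eq_true, cdmAltGo_iff]
      constructor
      · rintro ⟨d, hd, hend⟩
        refine ⟨d, hd, ?_⟩
        have := (PySem.Str.endswith_eq s ("." ++ d)) ▸ hend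
        have h2 := (PySem.Chars.endswith_iff _ _).mp this
        simpa using h2
      · rintro ⟨d, hd, hsuf⟩
        refine ⟨d, hd, ?_⟩
        rw [PySem.Str.endswith_eq]
        exact (PySem.Chars.endswith_iff _ _).mpr (by simpa using hsuf)
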